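-- pv_equiv track=rewrite | github.com/lazyelement/CodeOlympics2023-JakeTheBlindSnake | JakeTheBlindSnake.py | find_food
-- ===== SOURCE A (Python) =====
-- def find_food(grid):
--     rows = len(grid)
--     cols = len(grid[0])
--     snake_pos = [(i, j) for i in range(rows) for j in range(cols) if grid[i][j] == '$'][0]
--     path = []
--     visited = set()
--
--     def dfs(pos):
--         if grid[pos[0]][pos[1]] == 'F':
--             return True
--         visited.add(pos)
--         for move in ['up', 'down', 'left', 'right']:
--             if move == 'up' and pos[0] > 0 and grid[pos[0]-1][pos[1]] not in ['+', '-', '|'] and (pos[0]-1, pos[1]) not in visited: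
--                 path.append(move)
--                 if dfs((pos[0]-1, pos[1])):
--                     return True
--                 path.pop()
--             elif move == 'down' and pos[0] < rows-1 and grid[pos[0]+1][pos[1]] not in ['+', '-', '|'] and (pos[0]+1, pos[1]) not in visited:
--                 path.append(move)
--                 if dfs((pos[0]+1, pos[1])):
--                     return True
--                 path.pop()
--             elif move == 'left' and pos[1] > 0 and grid[pos[0]][pos[1]-1] not in ['+', '-', '|'] and (pos[0], pos[1]-1) not in visited:
--                 path.append(move)
--                 if dfs((pos[0], pos[1]-1)):
--                     return True
--                 path.pop()
--             elif move == 'right' and pos[1] < cols-1 and grid[pos[0]][pos[1]+1] not in ['+', '-', '|'] and (pos[0], pos[1]+1) not in visited: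
--                 path.append(move)
--                 if dfs((pos[0], pos[1]+1)):
--                     return True
--                 path.pop()
--         return False
--
--     dfs(snake_pos)
--     return ', '.join(path)
-- ===== SOURCE B (Python) =====
-- def find_food(grid):
--     rows = len(grid)
--     cols = len(grid[0])
--     snake_pos = [(i, j) for i in range(rows) for j in range(cols) if grid[i][j] == '$'][0]
--     DIRS = (('up', -1, 0), ('down', 1, 0), ('left', 0, -1), ('right', 0, 1))
--     visited = {snake_pos}
--     stack = [[snake_pos, 0, None]]
--     while stack:
--         (r, c), idx, _ = stack[-1]
--         if grid[r][c] == 'F':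
--             return ', '.join(f[2] for f in stack[1:])
--         if idx >= 4:
--             stack.pop()
--             continue
--         stack[-1][1] = idx + 1
--         name, dr, dc = DIRS[idx]
--         nr, nc = r + dr, c + dc
--         if 0 <= nr < rows and 0 <= nc < cols and grid[nr][nc] not in ('+', '-', '|') and (nr, nc) not in visited:
--             visited.add((nr, nc))
--             stack.append([(nr, nc), 0, name])
--     return ''
-- ===== Notes on version B (the rewrite author's own statement) =====
-- stated objective: alternative
-- what changed: A's recursive backtracking DFS mutating a shared path list is replaced by an iterative loop over an explicit stack of (position, next-move-index, incoming-move) frames, with the answer path read off the stack itself instead of being maintained separately.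
import Mathlib
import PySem

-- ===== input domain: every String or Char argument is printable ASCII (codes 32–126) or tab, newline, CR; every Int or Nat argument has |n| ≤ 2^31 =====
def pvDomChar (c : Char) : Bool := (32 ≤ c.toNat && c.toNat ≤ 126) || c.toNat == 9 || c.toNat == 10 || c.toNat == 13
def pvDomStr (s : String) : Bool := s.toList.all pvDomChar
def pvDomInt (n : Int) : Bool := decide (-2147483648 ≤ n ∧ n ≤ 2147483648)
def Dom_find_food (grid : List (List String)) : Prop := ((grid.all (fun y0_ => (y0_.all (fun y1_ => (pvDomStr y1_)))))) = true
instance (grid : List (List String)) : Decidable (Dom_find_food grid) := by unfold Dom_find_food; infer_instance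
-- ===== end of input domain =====

-- B replaces A's recursive backtracking DFS (shared mutable path, recursion) by an iterative loop over an
-- explicit stack of (position, next-move-index, incoming-move) frames, deriving the path from the stack
-- (objective: alternative decomposition, same asymptotic cost).

-- ===== PORT A =====
-- shared preamble helpers (both Pythons start with the identical snake-finding preamble)
def cellAt (grid : List (List String)) (i j : Int) : String :=
  (PySem.List.pyGet? ((PySem.List.pyGet? grid i).getD []) j).getD ""
  -- grid[i][j]; total form: in range whenever Pre_find_food holds and 0 ≤ i < rows, 0 ≤ j < cols

def candsA (grid : List (List String)) (rows cols : Int) : List (Int × Int) :=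
  (PySem.List.pyRange 0 rows 1).flatMap (fun i =>
    ((PySem.List.pyRange 0 cols 1).filter (fun j => cellAt grid i j = "$")).map (fun j => (i, j)))

def pvWalls : List String := ["+", "-", "|"]

def pvMoves : List String := ["up", "down", "left", "right"]

-- the if/elif chain of A's for-loop body, dispatched on the move name first (the four
-- move-equality tests are mutually exclusive, so this is the same chain): which child
-- (if any) the branch for `move` selects
def pickA (grid : List (List String)) (rows cols : Int) (vis : PySem.Set (Int × Int))
    (pos : Int × Int) (move : String) : Option (Int × Int) :=
  if move = "up" ∧ pos.1 > 0 ∧ cellAt grid (pos.1 - 1) pos.2 ∉ pvWalls ∧ (pos.1 - 1, pos.2) ∉ vis then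
    some (pos.1 - 1, pos.2)
  else if move = "down" ∧ pos.1 < rows - 1 ∧ cellAt grid (pos.1 + 1) pos.2 ∉ pvWalls ∧ (pos.1 + 1, pos.2) ∉ vis then
    some (pos.1 + 1, pos.2)
  else if move = "left" ∧ pos.2 > 0 ∧ cellAt grid pos.1 (pos.2 - 1) ∉ pvWalls ∧ (pos.1, pos.2 - 1) ∉ vis then
    some (pos.1, pos.2 - 1)
  else if move = "right" ∧ pos.2 < cols - 1 ∧ cellAt grid pos.1 (pos.2 + 1) ∉ pvWalls ∧ (pos.1, pos.2 + 1) ∉ vis then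
    some (pos.1, pos.2 + 1)
  else none

-- A's `for move in [...]` loop, recursing over the remaining moves; `dfs` is the recursive
-- call at the next-smaller fuel (state threading replaces Python's mutation of path/visited)
def tryA (grid : List (List String)) (rows cols : Int)
    (dfs : (Int × Int) → List String → PySem.Set (Int × Int) →
      Option (Bool × List String × PySem.Set (Int × Int))) :
    (Int × Int) → List String → List String → PySem.Set (Int × Int) →
    Option (Bool × List String × PySem.Set (Int × Int))
  | _, [], path, vis => some (false, path, vis)
  | pos, move :: rest, path, vis =>
    match pickA grid rows cols vis pos move with
    | none => tryA grid rows cols dfs pos rest path vis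
    | some child =>
      match dfs child (path ++ [move]) vis with
      | none => none
      | some (true, p, v) => some (true, p, v)
      | some (false, p, v) => tryA grid rows cols dfs pos rest p.dropLast v

-- A's dfs; fuel makes the recursion total — `none` (fuel exhausted) never occurs under Pre_ (proved below)
def dfsA (grid : List (List String)) (rows cols : Int) :
    Nat → (Int × Int) → List String → PySem.Set (Int × Int) →
    Option (Bool × List String × PySem.Set (Int × Int))
  | 0, _, _, _ => none
  | fuel + 1, pos, path, vis =>
    if cellAt grid pos.1 pos.2 = "F" then some (true, path, vis)
    else tryA grid rows cols (dfsA grid rows cols fuel) pos pvMoves path (PySem.Set.add vis pos)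

def find_food (grid : List (List String)) : String :=
  let rows : Int := PySem.List.len grid
  let cols : Int := PySem.List.len ((PySem.List.pyGet? grid 0).getD [])
  let snake : Int × Int := (PySem.List.pyGet? (candsA grid rows cols) 0).getD (0, 0)
  match dfsA grid rows cols (rows.toNat * cols.toNat + 1) snake [] PySem.Set.empty with
  | none => ""
  | some (_, p, _) => PySem.Str.join ", " p

-- ===== PORT B =====
def pvDirs : List (String × Int × Int) := [("up", -1, 0), ("down", 1, 0), ("left", 0, -1), ("right", 0, 1)]

-- path joined on success: moves of the stack frames, bottom (oldest) first; the root frame carries none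
def stackPath (stack : List ((Int × Int) × Nat × Option String)) : List String :=
  (stack.filterMap (fun fr => fr.2.2)).reverse

-- B's while loop; fuel makes it total (`none` = fuel exhausted, which never occurs for the
-- fuel find_food_alt passes — proved below)
def loopB (grid : List (List String)) (rows cols : Int) :
    Nat → List ((Int × Int) × Nat × Option String) → PySem.Set (Int × Int) → Option String
  | 0, _, _ => none
  | _ + 1, [], _ => some ""
  | fuel + 1, fr :: rest, vis =>
    if cellAt grid fr.1.1 fr.1.2 = "F" then some (PySem.Str.join ", " (stackPath (fr :: rest)))
    else if 4 ≤ fr.2.1 then loopB grid rows cols fuel rest vis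
    else
      let d := pvDirs.getD fr.2.1 ("", 0, 0)
      let nr := fr.1.1 + d.2.1
      let nc := fr.1.2 + d.2.2
      if 0 ≤ nr ∧ nr < rows ∧ 0 ≤ nc ∧ nc < cols ∧ cellAt grid nr nc ∉ pvWalls ∧ (nr, nc) ∉ vis then
        loopB grid rows cols fuel (((nr, nc), 0, some d.1) :: (fr.1, fr.2.1 + 1, fr.2.2) :: rest)
          (PySem.Set.add vis (nr, nc))
      else loopB grid rows cols fuel ((fr.1, fr.2.1 + 1, fr.2.2) :: rest) vis

def find_food_alt (grid : List (List String)) : String :=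
  let rows : Int := PySem.List.len grid
  let cols : Int := PySem.List.len ((PySem.List.pyGet? grid 0).getD [])
  let snake : Int × Int := (PySem.List.pyGet? (candsA grid rows cols) 0).getD (0, 0)
  (loopB grid rows cols (6 * (rows.toNat * cols.toNat) + 8) [(snake, 0, none)]
    (PySem.Set.add PySem.Set.empty snake)).getD ""

-- ===== PRECONDITION & SPEC =====
-- Pre_ excludes exactly the inputs where A raises: the empty grid (IndexError on grid[0]), a row shorter
-- than len(grid[0]) (IndexError while scanning), and grids with no '$' in the scanned rows×cols rectangle
-- (IndexError on [...][0]).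
def Pre_find_food (grid : List (List String)) : Prop :=
  grid ≠ [] ∧
  (∀ row ∈ grid, (grid.headD []).length ≤ row.length) ∧
  (∃ i < grid.length, ∃ j < (grid.headD []).length, (grid.getD i []).getD j "" = "$")
instance (grid : List (List String)) : Decidable (Pre_find_food grid) := by
  unfold Pre_find_food; infer_instance

def pvWitness_find_food : List (List String) := [[".", "$"], ["F", "."]]

def Spec_find_food (grid : List (List String)) (out : String) : Prop := out = find_food_alt grid
instance (grid : List (List String)) (out : String) : Decidable (Spec_find_food grid out) := by
  unfold Spec_find_food; infer_instance

-- ===== CLAIM (what is proved, stated in full; the proofs are below) =====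
def Claim_equal_find_food : Prop := ∀ (grid : List (List String)), Dom_find_food grid → Pre_find_food grid → Spec_find_food grid (find_food grid)

-- ===== LEMMAS AND PROOFS =====

-- the count of still-unvisited cells of the rows×cols rectangle: the termination measure
def freeC (rows cols : Int) (vis : PySem.Set (Int × Int)) : Nat :=
  ((List.range rows.toNat).flatMap (fun (i : Nat) =>
    (List.range cols.toNat).map (fun (j : Nat) => (((i : Int), (j : Int)) : Int × Int)))).countP
    (fun q => decide (q ∉ vis))

-- weight of a frame for B's step count: how many more iterations can look at it on top
def frameW (fr : (Int × Int) × Nat × Option String) : Nat := 5 - min fr.2.1 4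

-- "B's loop, started on this state with SOME fuel, returns s"
def EvB (grid : List (List String)) (rows cols : Int)
    (stack : List ((Int × Int) × Nat × Option String)) (vis : PySem.Set (Int × Int))
    (s : String) : Prop :=
  ∃ n, loopB grid rows cols n stack vis = some s

theorem countP_lt_of_flip {α : Type} (l : List α) (p q : α → Bool)
    (hpq : ∀ x ∈ l, q x = true → p x = true) (a : α) (ha : a ∈ l)
    (hpa : p a = true) (hqa : ¬ q a = true) : l.countP q < l.countP p := by
  induction l with
  | nil => cases ha
  | cons y l ih =>
    rw [List.countP_cons, List.countP_cons]
    rcases List.mem_cons.mp ha with h | h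
    · subst h
      have h1 : l.countP q ≤ l.countP p :=
        List.countP_mono_left (fun x hx => hpq x (List.mem_cons_of_mem _ hx))
      have e1 : (if p a = true then 1 else 0) = 1 := by simp [hpa]
      have e2 : (if q a = true then 1 else 0) = 0 := by simp [hqa]
      rw [e1, e2]
      omega
    · have h3 := ih (fun x hx hqx => hpq x (List.mem_cons_of_mem _ hx) hqx) h
      have h2 : (if q y = true then 1 else 0) ≤ (if p y = true then 1 else 0) := by
        by_cases hq : q y = true
        · simp [hq, hpq y List.mem_cons_self hq]
        · simp [hq]
      omega

theorem mem_grid_enum (rows cols : Int) (a : Int × Int)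
    (h1 : 0 ≤ a.1) (h2 : a.1 < rows) (h3 : 0 ≤ a.2) (h4 : a.2 < cols) :
    a ∈ (List.range rows.toNat).flatMap (fun (i : Nat) =>
      (List.range cols.toNat).map (fun (j : Nat) => (((i : Int), (j : Int)) : Int × Int))) := by
  rcases a with ⟨x, y⟩
  simp only at h1 h2 h3 h4
  simp only [List.mem_flatMap, List.mem_map, List.mem_range, Prod.mk.injEq]
  exact ⟨x.toNat, by omega, y.toNat, by omega, by omega, by omega⟩

theorem freeC_add_lt (rows cols : Int) (vis : PySem.Set (Int × Int)) (a : Int × Int)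
    (h1 : 0 ≤ a.1) (h2 : a.1 < rows) (h3 : 0 ≤ a.2) (h4 : a.2 < cols) (h5 : a ∉ vis) :
    freeC rows cols (PySem.Set.add vis a) < freeC rows cols vis := by
  refine countP_lt_of_flip _ _ _ ?_ a (mem_grid_enum rows cols a h1 h2 h3 h4) (by simp [h5])
    (by simp [PySem.Set.mem_add])
  intro x hx hq
  simp only [decide_eq_true_eq] at hq ⊢
  intro hmem
  exact hq ((PySem.Set.mem_add _ _ _).mpr (Or.inl hmem))

theorem stackPath_cons (fr : (Int × Int) × Nat × Option String)
    (s : List ((Int × Int) × Nat × Option String)) :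
    stackPath (fr :: s) = stackPath s ++ fr.2.2.toList := by
  rcases fr with ⟨pos, k, mv⟩
  cases mv <;> simp [stackPath]

theorem subset_add {x : Int × Int} (s : PySem.Set (Int × Int)) : s ⊆ PySem.Set.add s x := by
  intro y hy
  exact (PySem.Set.mem_add _ _ _).mpr (Or.inl hy)

theorem freeC_subset (rows cols : Int) {s t : PySem.Set (Int × Int)} (h : s ⊆ t) :
    freeC rows cols t ≤ freeC rows cols s := by
  apply List.countP_mono_left
  intro x _ hx
  simp only [decide_eq_true_eq] at hx ⊢
  exact fun hmem => hx (h hmem)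

theorem freeC_pos (rows cols : Int) (vis : PySem.Set (Int × Int)) (a : Int × Int)
    (h1 : 0 ≤ a.1) (h2 : a.1 < rows) (h3 : 0 ≤ a.2) (h4 : a.2 < cols) (h5 : a ∉ vis) :
    0 < freeC rows cols vis := by
  exact List.countP_pos_iff.mpr ⟨a, mem_grid_enum rows cols a h1 h2 h3 h4, by simp [h5]⟩

-- failure restores the path (every append is popped again), mirroring Python's path.pop()
theorem restore_try (grid : List (List String)) (rows cols : Int)
    (dfs : (Int × Int) → List String → PySem.Set (Int × Int) →
      Option (Bool × List String × PySem.Set (Int × Int)))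
    (hd : ∀ pos path vis p v, dfs pos path vis = some (false, p, v) → p = path) :
    ∀ moves pos path vis p v,
      tryA grid rows cols dfs pos moves path vis = some (false, p, v) → p = path := by
  intro moves
  induction moves with
  | nil =>
    intro pos path vis p v h
    rw [tryA] at h
    injection h with h'
    injection h' with _ h''
    injection h'' with h1 _
    exact h1.symm
  | cons m rest ih =>
    intro pos path vis p v h
    rw [tryA] at h
    cases hp : pickA grid rows cols vis pos m with
    | none =>
      rw [hp] at h
      dsimp only at h
      exact ih _ _ _ _ _ h
    | some child =>
      rw [hp] at h
      dsimp only at h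
      cases hd2 : dfs child (path ++ [m]) vis with
      | none => rw [hd2] at h; simp at h
      | some r =>
        rw [hd2] at h
        obtain ⟨b0, p0, v0⟩ := r
        cases b0 with
        | true => simp at h
        | false =>
          dsimp only at h
          have hp0 : p0 = path ++ [m] := hd _ _ _ _ _ hd2
          have := ih _ _ _ _ _ h
          rw [this, hp0, List.dropLast_concat]

theorem restore_dfs (grid : List (List String)) (rows cols : Int) :
    ∀ (f : Nat) pos path vis p v,
      dfsA grid rows cols f pos path vis = some (false, p, v) → p = path := by
  intro f
  induction f with
  | zero => intro pos path vis p v h; rw [dfsA] at h; cases h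
  | succ f ih =>
    intro pos path vis p v h
    rw [dfsA] at h
    by_cases hF : cellAt grid pos.1 pos.2 = "F"
    · simp [hF] at h
    · rw [if_neg hF] at h
      exact restore_try grid rows cols _ ih _ _ _ _ _ _ h

-- visited only grows
theorem mono_try (grid : List (List String)) (rows cols : Int)
    (dfs : (Int × Int) → List String → PySem.Set (Int × Int) →
      Option (Bool × List String × PySem.Set (Int × Int)))
    (hd : ∀ pos path vis b p v, dfs pos path vis = some (b, p, v) → vis ⊆ v) :
    ∀ moves pos path vis b p v,
      tryA grid rows cols dfs pos moves path vis = some (b, p, v) → vis ⊆ v := by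
  intro moves
  induction moves with
  | nil =>
    intro pos path vis b p v h
    rw [tryA] at h
    injection h with h'
    injection h' with _ h''
    injection h'' with _ h2
    exact h2 ▸ fun _ hx => hx
  | cons m rest ih =>
    intro pos path vis b p v h
    rw [tryA] at h
    cases hp : pickA grid rows cols vis pos m with
    | none => rw [hp] at h; dsimp only at h; exact ih _ _ _ _ _ _ h
    | some child =>
      rw [hp] at h
      dsimp only at h
      cases hd2 : dfs child (path ++ [m]) vis with
      | none => rw [hd2] at h; simp at h
      | some r =>
        rw [hd2] at h
        obtain ⟨b0, p0, v0⟩ := r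
        have hsub : vis ⊆ v0 := hd _ _ _ _ _ _ hd2
        cases b0 with
        | true =>
          dsimp only at h
          injection h with h'
          injection h' with _ h''
          injection h'' with _ h2
          exact h2 ▸ hsub
        | false =>
          dsimp only at h
          exact fun x hx => ih _ _ _ _ _ _ h (hsub hx)

theorem mono_dfs (grid : List (List String)) (rows cols : Int) :
    ∀ (f : Nat) pos path vis b p v,
      dfsA grid rows cols f pos path vis = some (b, p, v) → vis ⊆ v := by
  intro f
  induction f with
  | zero => intro pos path vis b p v h; rw [dfsA] at h; cases h
  | succ f ih =>
    intro pos path vis b p v h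
    rw [dfsA] at h
    by_cases hF : cellAt grid pos.1 pos.2 = "F"
    · rw [if_pos hF] at h
      injection h with h'
      injection h' with _ h''
      injection h'' with _ h2
      exact h2 ▸ fun _ hx => hx
    · rw [if_neg hF] at h
      exact fun x hx => mono_try grid rows cols _ ih _ _ _ _ _ _ _ h (subset_add vis hx)

-- a fired branch of A's chain yields an in-bounds, unvisited child
theorem pickA_sound (grid : List (List String)) (rows cols : Int) (vis : PySem.Set (Int × Int))
    (pos : Int × Int) (move : String) (child : Int × Int)
    (h : pickA grid rows cols vis pos move = some child)
    (b1 : 0 ≤ pos.1) (b2 : pos.1 < rows) (b3 : 0 ≤ pos.2) (b4 : pos.2 < cols) :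
    (0 ≤ child.1 ∧ child.1 < rows ∧ 0 ≤ child.2 ∧ child.2 < cols) ∧ child ∉ vis := by
  unfold pickA at h
  split_ifs at h with c1 c2 c3 c4 <;>
    (injection h with h'; subst h')
  · exact ⟨⟨by omega, by omega, b3, b4⟩, c1.2.2.2⟩
  · exact ⟨⟨by omega, by omega, b3, b4⟩, c2.2.2.2⟩
  · exact ⟨⟨b1, b2, by omega, by omega⟩, c3.2.2.2⟩
  · exact ⟨⟨b1, b2, by omega, by omega⟩, c4.2.2.2⟩

-- fuel rows*cols+1 is always enough for A: each recursive call visits a fresh cell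
theorem suff_try (grid : List (List String)) (rows cols : Int) (f : Nat)
    (hd : ∀ pos path vis, pos ∉ vis → 0 ≤ pos.1 → pos.1 < rows → 0 ≤ pos.2 → pos.2 < cols →
      freeC rows cols vis ≤ f → dfsA grid rows cols f pos path vis ≠ none) :
    ∀ moves pos path vis, 0 ≤ pos.1 → pos.1 < rows → 0 ≤ pos.2 → pos.2 < cols →
      freeC rows cols vis ≤ f →
      tryA grid rows cols (dfsA grid rows cols f) pos moves path vis ≠ none := by
  intro moves
  induction moves with
  | nil => intro pos path vis _ _ _ _ _ h; rw [tryA] at h; cases h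
  | cons m rest ih =>
    intro pos path vis b1 b2 b3 b4 hf h
    rw [tryA] at h
    cases hp : pickA grid rows cols vis pos m with
    | none => rw [hp] at h; dsimp only at h; exact ih _ _ _ b1 b2 b3 b4 hf h
    | some child =>
      rw [hp] at h
      dsimp only at h
      obtain ⟨⟨c1, c2, c3, c4⟩, c5⟩ := pickA_sound grid rows cols vis pos m child hp b1 b2 b3 b4
      cases hd2 : dfsA grid rows cols f child (path ++ [m]) vis with
      | none => exact hd _ _ _ c5 c1 c2 c3 c4 hf hd2
      | some r =>
        rw [hd2] at h
        obtain ⟨b0, p0, v0⟩ := r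
        cases b0 with
        | true => dsimp only at h; cases h
        | false =>
          dsimp only at h
          have hsub : vis ⊆ v0 := mono_dfs grid rows cols f _ _ _ _ _ _ hd2
          have : freeC rows cols v0 ≤ f := le_trans (freeC_subset rows cols hsub) hf
          exact ih _ _ _ b1 b2 b3 b4 this h

theorem suff_dfs (grid : List (List String)) (rows cols : Int) :
    ∀ (f : Nat) pos path vis, pos ∉ vis → 0 ≤ pos.1 → pos.1 < rows → 0 ≤ pos.2 → pos.2 < cols →
      freeC rows cols vis ≤ f → dfsA grid rows cols f pos path vis ≠ none := by
  intro f
  induction f with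
  | zero =>
    intro pos path vis h5 b1 b2 b3 b4 hf
    have := freeC_pos rows cols vis pos b1 b2 b3 b4 h5
    omega
  | succ f ih =>
    intro pos path vis h5 b1 b2 b3 b4 hf h
    rw [dfsA] at h
    by_cases hF : cellAt grid pos.1 pos.2 = "F"
    · rw [if_pos hF] at h; cases h
    · rw [if_neg hF] at h
      have hlt : freeC rows cols (PySem.Set.add vis pos) < freeC rows cols vis :=
        freeC_add_lt rows cols vis pos b1 b2 b3 b4 h5
      exact suff_try grid rows cols f ih _ _ _ _ b1 b2 b3 b4 (by omega) h

-- B's loop result is stable under extra fuel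
theorem loopB_mono (grid : List (List String)) (rows cols : Int) :
    ∀ (n : Nat) stack vis s, loopB grid rows cols n stack vis = some s →
      loopB grid rows cols (n + 1) stack vis = some s := by
  intro n
  induction n with
  | zero => intro stack vis s h; rw [loopB] at h; cases h
  | succ n ih =>
    intro stack vis s h
    cases stack with
    | nil => rw [loopB] at h ⊢; exact h
    | cons fr rest =>
      rw [loopB] at h ⊢
      by_cases hF : cellAt grid fr.1.1 fr.1.2 = "F"
      · rw [if_pos hF] at h ⊢; exact h
      · rw [if_neg hF] at h ⊢
        by_cases h4 : 4 ≤ fr.2.1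
        · rw [if_pos h4] at h ⊢; exact ih _ _ _ h
        · rw [if_neg h4] at h ⊢
          by_cases hg : 0 ≤ fr.1.1 + (pvDirs.getD fr.2.1 ("", 0, 0)).2.1 ∧
              fr.1.1 + (pvDirs.getD fr.2.1 ("", 0, 0)).2.1 < rows ∧
              0 ≤ fr.1.2 + (pvDirs.getD fr.2.1 ("", 0, 0)).2.2 ∧
              fr.1.2 + (pvDirs.getD fr.2.1 ("", 0, 0)).2.2 < cols ∧
              cellAt grid (fr.1.1 + (pvDirs.getD fr.2.1 ("", 0, 0)).2.1)
                (fr.1.2 + (pvDirs.getD fr.2.1 ("", 0, 0)).2.2) ∉ pvWalls ∧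
              (fr.1.1 + (pvDirs.getD fr.2.1 ("", 0, 0)).2.1,
                fr.1.2 + (pvDirs.getD fr.2.1 ("", 0, 0)).2.2) ∉ vis
          · rw [if_pos hg] at h ⊢; exact ih _ _ _ h
          · rw [if_neg hg] at h ⊢; exact ih _ _ _ h

theorem loopB_mono_le (grid : List (List String)) (rows cols : Int)
    (n m : Nat) (hnm : n ≤ m) (stack : List ((Int × Int) × Nat × Option String))
    (vis : PySem.Set (Int × Int)) (s : String)
    (h : loopB grid rows cols n stack vis = some s) :
    loopB grid rows cols m stack vis = some s := by
  induction m with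
  | zero => exact (by omega : n = 0) ▸ h
  | succ m ih =>
    rcases Nat.lt_or_ge n (m + 1) with hlt | hge
    · exact loopB_mono grid rows cols m _ _ _ (ih (by omega))
    · have : n = m + 1 := by omega
      exact this ▸ h

-- fuel 6*rows*cols+8 is always enough for B: every iteration strictly shrinks
-- 6*(unvisited cells) + (total frame weight)
theorem loopB_suff (grid : List (List String)) (rows cols : Int) :
    ∀ (n : Nat) stack vis,
      6 * freeC rows cols vis + (stack.map frameW).sum < n →
      loopB grid rows cols n stack vis ≠ none := by
  intro n
  induction n with
  | zero => intro stack vis hlt; omega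
  | succ n ih =>
    intro stack vis hlt h
    cases stack with
    | nil => rw [loopB] at h; cases h
    | cons fr rest =>
      rw [loopB] at h
      by_cases hF : cellAt grid fr.1.1 fr.1.2 = "F"
      · rw [if_pos hF] at h; cases h
      · rw [if_neg hF] at h
        have hw : 1 ≤ frameW fr := by unfold frameW; omega
        by_cases h4 : 4 ≤ fr.2.1
        · rw [if_pos h4] at h
          refine ih rest vis ?_ h
          simp only [List.map_cons, List.sum_cons] at hlt
          omega
        · rw [if_neg h4] at h
          set d := pvDirs.getD fr.2.1 ("", 0, 0) with hd
          by_cases hg : 0 ≤ fr.1.1 + d.2.1 ∧ fr.1.1 + d.2.1 < rows ∧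
              0 ≤ fr.1.2 + d.2.2 ∧ fr.1.2 + d.2.2 < cols ∧
              cellAt grid (fr.1.1 + d.2.1) (fr.1.2 + d.2.2) ∉ pvWalls ∧
              (fr.1.1 + d.2.1, fr.1.2 + d.2.2) ∉ vis
          · rw [if_pos hg] at h
            refine ih _ _ ?_ h
            have hfc : freeC rows cols (PySem.Set.add vis (fr.1.1 + d.2.1, fr.1.2 + d.2.2)) <
                freeC rows cols vis :=
              freeC_add_lt rows cols vis _ hg.1 hg.2.1 hg.2.2.1 hg.2.2.2.1 hg.2.2.2.2.2
            simp only [List.map_cons, List.sum_cons] at hlt ⊢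
            have hw1 : frameW ((fr.1.1 + d.2.1, fr.1.2 + d.2.2), 0, some d.1) = 5 := by
              unfold frameW; simp
            have hw2 : frameW (fr.1, fr.2.1 + 1, fr.2.2) + 1 = frameW fr := by
              unfold frameW; simp only; omega
            omega
          · rw [if_neg hg] at h
            refine ih _ _ ?_ h
            simp only [List.map_cons, List.sum_cons] at hlt ⊢
            have hw2 : frameW (fr.1, fr.2.1 + 1, fr.2.2) + 1 = frameW fr := by
              unfold frameW; simp only; omega
            omega

-- ===== the simulation: one stack frame of B corresponds to one activation of A's dfs =====

def TrySimP (grid : List (List String)) (rows cols : Int) (f : Nat) (k : Nat) : Prop :=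
  ∀ (pos : Int × Int) path vis rest mv b p v s,
    tryA grid rows cols (dfsA grid rows cols f) pos (pvMoves.drop k) path vis = some (b, p, v) →
    0 ≤ pos.1 → pos.1 < rows → 0 ≤ pos.2 → pos.2 < cols →
    cellAt grid pos.1 pos.2 ≠ "F" →
    path = stackPath ((pos, k, mv) :: rest) →
    (if b then s = PySem.Str.join ", " p else EvB grid rows cols rest v s) →
    EvB grid rows cols ((pos, k, mv) :: rest) vis s

def DfsSimP (grid : List (List String)) (rows cols : Int) (f : Nat) : Prop :=
  ∀ (pos : Int × Int) path vis rest mv b p v s,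
    dfsA grid rows cols f pos path vis = some (b, p, v) →
    0 ≤ pos.1 → pos.1 < rows → 0 ≤ pos.2 → pos.2 < cols →
    path = stackPath ((pos, 0, mv) :: rest) →
    (if b then s = PySem.Str.join ", " p else EvB grid rows cols rest v s) →
    EvB grid rows cols ((pos, 0, mv) :: rest) (PySem.Set.add vis pos) s

theorem trySim4 (grid : List (List String)) (rows cols : Int) (f : Nat) :
    TrySimP grid rows cols f 4 := by
  intro pos path vis rest mv b p v s hA b1 b2 b3 b4 hF hpath hs
  rw [show pvMoves.drop 4 = [] from rfl] at hA
  rw [tryA] at hA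
  injection hA with h'
  injection h' with hb h''
  injection h'' with _ hv
  rw [← hb] at hs
  rw [← hv] at hs
  simp only [if_false, Bool.false_eq_true] at hs
  obtain ⟨n, hn⟩ := hs
  exact ⟨n + 1, by rw [loopB, if_neg hF, if_pos (by omega : 4 ≤ 4)]; exact hn⟩

theorem trySimStep (grid : List (List String)) (rows cols : Int) (f : Nat) (k : Nat) (hk : k < 4)
    (hnext : TrySimP grid rows cols f (k + 1)) (hdfs : DfsSimP grid rows cols f) :
    TrySimP grid rows cols f k := by
  intro pos path vis rest mv b p v s hA b1 b2 b3 b4 hF hpath hs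
  interval_cases k
  · -- k = 0, move "up"
    rw [show pvMoves.drop 0 = "up" :: pvMoves.drop 1 from rfl, tryA] at hA
    by_cases hg : pos.1 > 0 ∧ cellAt grid (pos.1 - 1) pos.2 ∉ pvWalls ∧ (pos.1 - 1, pos.2) ∉ vis
    · have hpick : pickA grid rows cols vis pos "up" = some (pos.1 - 1, pos.2) := by
        simp [pickA, hg]
      rw [hpick] at hA
      dsimp only at hA
      have hpath1 : path = stackPath ((pos, 1, mv) :: rest) := by
        rw [stackPath_cons] at hpath ⊢; exact hpath
      cases hd2 : dfsA grid rows cols f (pos.1 - 1, pos.2) (path ++ ["up"]) vis with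
      | none => rw [hd2] at hA; simp at hA
      | some r =>
        obtain ⟨b0, p0, v0⟩ := r
        rw [hd2] at hA
        have hchild : EvB grid rows cols (((pos.1 - 1, pos.2), 0, some "up") :: (pos, 1, mv) :: rest)
            (PySem.Set.add vis (pos.1 - 1, pos.2)) s := by
          refine hdfs (pos.1 - 1, pos.2) (path ++ ["up"]) vis ((pos, 1, mv) :: rest) (some "up")
            b0 p0 v0 s hd2 (by omega) (by omega) b3 b4 (by rw [stackPath_cons, ← hpath1]; simp) ?_
          cases b0 with
          | true =>
            dsimp only at hA
            injection hA with h'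
            injection h' with hb h''
            injection h'' with hp' hv'
            rw [← hb] at hs
            simp only [if_true] at hs ⊢
            rw [hp']
            exact hs
          | false =>
            dsimp only at hA
            have hp0 : p0 = path ++ ["up"] := restore_dfs grid rows cols f _ _ _ _ _ hd2
            rw [hp0, List.dropLast_concat] at hA
            simp only [Bool.false_eq_true, if_false]
            exact hnext pos path v0 rest mv b p v s hA b1 b2 b3 b4 hF hpath1 hs
        obtain ⟨n, hn⟩ := hchild
        refine ⟨n + 1, ?_⟩
        rw [loopB, if_neg hF, if_neg (by omega : ¬ 4 ≤ 0)]
        simp only [pvDirs, List.getD_cons_zero]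
        have e1 : pos.1 + (-1 : Int) = pos.1 - 1 := by ring
        have e2 : pos.2 + (0 : Int) = pos.2 := by ring
        simp only [e1, e2]
        rw [if_pos ⟨by omega, by omega, b3, b4, hg.2.1, hg.2.2⟩]
        exact hn
    · have hpick : pickA grid rows cols vis pos "up" = none := by
        simp [pickA, hg]
      rw [hpick] at hA
      dsimp only at hA
      obtain ⟨n, hn⟩ := hnext pos path vis rest mv b p v s hA b1 b2 b3 b4 hF
        (by rw [stackPath_cons] at hpath ⊢; exact hpath) hs
      refine ⟨n + 1, ?_⟩
      rw [loopB, if_neg hF, if_neg (by omega : ¬ 4 ≤ 0)]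
      simp only [pvDirs, List.getD_cons_zero]
      have e1 : pos.1 + (-1 : Int) = pos.1 - 1 := by ring
      have e2 : pos.2 + (0 : Int) = pos.2 := by ring
      simp only [e1, e2]
      rw [if_neg (by intro hc; exact hg ⟨by omega, hc.2.2.2.2.1, hc.2.2.2.2.2⟩)]
      exact hn
  · -- k = 1, move "down"
    rw [show pvMoves.drop 1 = "down" :: pvMoves.drop 2 from rfl, tryA] at hA
    by_cases hg : pos.1 < rows - 1 ∧ cellAt grid (pos.1 + 1) pos.2 ∉ pvWalls ∧ (pos.1 + 1, pos.2) ∉ vis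
    · have hpick : pickA grid rows cols vis pos "down" = some (pos.1 + 1, pos.2) := by
        simp [pickA, hg]
      rw [hpick] at hA
      dsimp only at hA
      have hpath1 : path = stackPath ((pos, 2, mv) :: rest) := by
        rw [stackPath_cons] at hpath ⊢; exact hpath
      cases hd2 : dfsA grid rows cols f (pos.1 + 1, pos.2) (path ++ ["down"]) vis with
      | none => rw [hd2] at hA; simp at hA
      | some r =>
        obtain ⟨b0, p0, v0⟩ := r
        rw [hd2] at hA
        have hchild : EvB grid rows cols (((pos.1 + 1, pos.2), 0, some "down") :: (pos, 2, mv) :: rest)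
            (PySem.Set.add vis (pos.1 + 1, pos.2)) s := by
          refine hdfs (pos.1 + 1, pos.2) (path ++ ["down"]) vis ((pos, 2, mv) :: rest) (some "down")
            b0 p0 v0 s hd2 (by omega) (by omega) b3 b4 (by rw [stackPath_cons, ← hpath1]; simp) ?_
          cases b0 with
          | true =>
            dsimp only at hA
            injection hA with h'
            injection h' with hb h''
            injection h'' with hp' hv'
            rw [← hb] at hs
            simp only [if_true] at hs ⊢
            rw [hp']
            exact hs
          | false =>
            dsimp only at hA
            have hp0 : p0 = path ++ ["down"] := restore_dfs grid rows cols f _ _ _ _ _ hd2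
            rw [hp0, List.dropLast_concat] at hA
            simp only [Bool.false_eq_true, if_false]
            exact hnext pos path v0 rest mv b p v s hA b1 b2 b3 b4 hF hpath1 hs
        obtain ⟨n, hn⟩ := hchild
        refine ⟨n + 1, ?_⟩
        rw [loopB, if_neg hF, if_neg (by omega : ¬ 4 ≤ 1)]
        simp only [pvDirs, List.getD_cons_zero, List.getD_cons_succ]
        have e2 : pos.2 + (0 : Int) = pos.2 := by ring
        simp only [e2]
        rw [if_pos ⟨by omega, by omega, b3, b4, hg.2.1, hg.2.2⟩]
        exact hn
    · have hpick : pickA grid rows cols vis pos "down" = none := by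
        simp [pickA, hg]
      rw [hpick] at hA
      dsimp only at hA
      obtain ⟨n, hn⟩ := hnext pos path vis rest mv b p v s hA b1 b2 b3 b4 hF
        (by rw [stackPath_cons] at hpath ⊢; exact hpath) hs
      refine ⟨n + 1, ?_⟩
      rw [loopB, if_neg hF, if_neg (by omega : ¬ 4 ≤ 1)]
      simp only [pvDirs, List.getD_cons_zero, List.getD_cons_succ]
      have e2 : pos.2 + (0 : Int) = pos.2 := by ring
      simp only [e2]
      rw [if_neg (by intro hc; exact hg ⟨by omega, hc.2.2.2.2.1, hc.2.2.2.2.2⟩)]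
      exact hn
  · -- k = 2, move "left"
    rw [show pvMoves.drop 2 = "left" :: pvMoves.drop 3 from rfl, tryA] at hA
    by_cases hg : pos.2 > 0 ∧ cellAt grid pos.1 (pos.2 - 1) ∉ pvWalls ∧ (pos.1, pos.2 - 1) ∉ vis
    · have hpick : pickA grid rows cols vis pos "left" = some (pos.1, pos.2 - 1) := by
        simp [pickA, hg]
      rw [hpick] at hA
      dsimp only at hA
      have hpath1 : path = stackPath ((pos, 3, mv) :: rest) := by
        rw [stackPath_cons] at hpath ⊢; exact hpath
      cases hd2 : dfsA grid rows cols f (pos.1, pos.2 - 1) (path ++ ["left"]) vis with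
      | none => rw [hd2] at hA; simp at hA
      | some r =>
        obtain ⟨b0, p0, v0⟩ := r
        rw [hd2] at hA
        have hchild : EvB grid rows cols (((pos.1, pos.2 - 1), 0, some "left") :: (pos, 3, mv) :: rest)
            (PySem.Set.add vis (pos.1, pos.2 - 1)) s := by
          refine hdfs (pos.1, pos.2 - 1) (path ++ ["left"]) vis ((pos, 3, mv) :: rest) (some "left")
            b0 p0 v0 s hd2 b1 b2 (by omega) (by omega) (by rw [stackPath_cons, ← hpath1]; simp) ?_
          cases b0 with
          | true =>
            dsimp only at hA
            injection hA with h'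
            injection h' with hb h''
            injection h'' with hp' hv'
            rw [← hb] at hs
            simp only [if_true] at hs ⊢
            rw [hp']
            exact hs
          | false =>
            dsimp only at hA
            have hp0 : p0 = path ++ ["left"] := restore_dfs grid rows cols f _ _ _ _ _ hd2
            rw [hp0, List.dropLast_concat] at hA
            simp only [Bool.false_eq_true, if_false]
            exact hnext pos path v0 rest mv b p v s hA b1 b2 b3 b4 hF hpath1 hs
        obtain ⟨n, hn⟩ := hchild
        refine ⟨n + 1, ?_⟩
        rw [loopB, if_neg hF, if_neg (by omega : ¬ 4 ≤ 2)]
        simp only [pvDirs, List.getD_cons_zero, List.getD_cons_succ]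
        have e1 : pos.1 + (0 : Int) = pos.1 := by ring
        have e2 : pos.2 + (-1 : Int) = pos.2 - 1 := by ring
        simp only [e1, e2]
        rw [if_pos ⟨b1, b2, by omega, by omega, hg.2.1, hg.2.2⟩]
        exact hn
    · have hpick : pickA grid rows cols vis pos "left" = none := by
        simp [pickA, hg]
      rw [hpick] at hA
      dsimp only at hA
      obtain ⟨n, hn⟩ := hnext pos path vis rest mv b p v s hA b1 b2 b3 b4 hF
        (by rw [stackPath_cons] at hpath ⊢; exact hpath) hs
      refine ⟨n + 1, ?_⟩
      rw [loopB, if_neg hF, if_neg (by omega : ¬ 4 ≤ 2)]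
      simp only [pvDirs, List.getD_cons_zero, List.getD_cons_succ]
      have e1 : pos.1 + (0 : Int) = pos.1 := by ring
      have e2 : pos.2 + (-1 : Int) = pos.2 - 1 := by ring
      simp only [e1, e2]
      rw [if_neg (by intro hc; exact hg ⟨by omega, hc.2.2.2.2.1, hc.2.2.2.2.2⟩)]
      exact hn
  · -- k = 3, move "right"
    rw [show pvMoves.drop 3 = "right" :: pvMoves.drop 4 from rfl, tryA] at hA
    by_cases hg : pos.2 < cols - 1 ∧ cellAt grid pos.1 (pos.2 + 1) ∉ pvWalls ∧ (pos.1, pos.2 + 1) ∉ vis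
    · have hpick : pickA grid rows cols vis pos "right" = some (pos.1, pos.2 + 1) := by
        simp [pickA, hg]
      rw [hpick] at hA
      dsimp only at hA
      have hpath1 : path = stackPath ((pos, 4, mv) :: rest) := by
        rw [stackPath_cons] at hpath ⊢; exact hpath
      cases hd2 : dfsA grid rows cols f (pos.1, pos.2 + 1) (path ++ ["right"]) vis with
      | none => rw [hd2] at hA; simp at hA
      | some r =>
        obtain ⟨b0, p0, v0⟩ := r
        rw [hd2] at hA
        have hchild : EvB grid rows cols (((pos.1, pos.2 + 1), 0, some "right") :: (pos, 4, mv) :: rest)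
            (PySem.Set.add vis (pos.1, pos.2 + 1)) s := by
          refine hdfs (pos.1, pos.2 + 1) (path ++ ["right"]) vis ((pos, 4, mv) :: rest) (some "right")
            b0 p0 v0 s hd2 b1 b2 (by omega) (by omega) (by rw [stackPath_cons, ← hpath1]; simp) ?_
          cases b0 with
          | true =>
            dsimp only at hA
            injection hA with h'
            injection h' with hb h''
            injection h'' with hp' hv'
            rw [← hb] at hs
            simp only [if_true] at hs ⊢
            rw [hp']
            exact hs
          | false =>
            dsimp only at hA
            have hp0 : p0 = path ++ ["right"] := restore_dfs grid rows cols f _ _ _ _ _ hd2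
            rw [hp0, List.dropLast_concat] at hA
            simp only [Bool.false_eq_true, if_false]
            exact hnext pos path v0 rest mv b p v s hA b1 b2 b3 b4 hF hpath1 hs
        obtain ⟨n, hn⟩ := hchild
        refine ⟨n + 1, ?_⟩
        rw [loopB, if_neg hF, if_neg (by omega : ¬ 4 ≤ 3)]
        simp only [pvDirs, List.getD_cons_zero, List.getD_cons_succ]
        have e1 : pos.1 + (0 : Int) = pos.1 := by ring
        simp only [e1]
        rw [if_pos ⟨b1, b2, by omega, by omega, hg.2.1, hg.2.2⟩]
        exact hn
    · have hpick : pickA grid rows cols vis pos "right" = none := by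
        simp [pickA, hg]
      rw [hpick] at hA
      dsimp only at hA
      obtain ⟨n, hn⟩ := hnext pos path vis rest mv b p v s hA b1 b2 b3 b4 hF
        (by rw [stackPath_cons] at hpath ⊢; exact hpath) hs
      refine ⟨n + 1, ?_⟩
      rw [loopB, if_neg hF, if_neg (by omega : ¬ 4 ≤ 3)]
      simp only [pvDirs, List.getD_cons_zero, List.getD_cons_succ]
      have e1 : pos.1 + (0 : Int) = pos.1 := by ring
      simp only [e1]
      rw [if_neg (by intro hc; exact hg ⟨by omega, hc.2.2.2.2.1, hc.2.2.2.2.2⟩)]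
      exact hn

theorem dfsSim (grid : List (List String)) (rows cols : Int) :
    ∀ (f : Nat), DfsSimP grid rows cols f := by
  intro f
  induction f with
  | zero => intro pos path vis rest mv b p v s hA; rw [dfsA] at hA; cases hA
  | succ f ih =>
    intro pos path vis rest mv b p v s hA b1 b2 b3 b4 hpath hs
    rw [dfsA] at hA
    by_cases hF : cellAt grid pos.1 pos.2 = "F"
    · rw [if_pos hF] at hA
      injection hA with h'
      injection h' with hb h''
      injection h'' with hp _
      rw [← hb] at hs
      simp only [if_true] at hs
      refine ⟨1, ?_⟩
      rw [loopB, if_pos hF, ← hpath, hp, hs]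
    · rw [if_neg hF] at hA
      have h0 : TrySimP grid rows cols f 0 :=
        trySimStep grid rows cols f 0 (by omega)
          (trySimStep grid rows cols f 1 (by omega)
            (trySimStep grid rows cols f 2 (by omega)
              (trySimStep grid rows cols f 3 (by omega) (trySim4 grid rows cols f) ih) ih) ih) ih
      exact h0 pos path (PySem.Set.add vis pos) rest mv b p v s hA b1 b2 b3 b4 hF hpath hs

theorem freeC_le (rows cols : Int) (vis : PySem.Set (Int × Int)) :
    freeC rows cols vis ≤ rows.toNat * cols.toNat := by
  unfold freeC
  refine le_trans List.countP_le_length (le_of_eq ?_)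
  simp [List.length_flatMap]

theorem candsA_bounds (grid : List (List String)) (rows cols : Int) (c : Int × Int)
    (h : c ∈ candsA grid rows cols) : 0 ≤ c.1 ∧ c.1 < rows ∧ 0 ≤ c.2 ∧ c.2 < cols := by
  unfold candsA at h
  simp only [List.mem_flatMap, List.mem_map, List.mem_filter] at h
  obtain ⟨i, hi, j, ⟨hj, _⟩, rfl⟩ := h
  rw [PySem.List.mem_pyRange_one] at hi hj
  exact ⟨hi.1, hi.2, hj.1, hj.2⟩

theorem cellAt_eq (grid : List (List String)) (i j : Nat) (hi : i < grid.length)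
    (hj : j < (grid[i]'hi).length) :
    cellAt grid (i : Int) (j : Int) = (grid[i]'hi)[j]'hj := by
  unfold cellAt
  simp only [PySem.List.pyGet?_natCast]
  rw [List.getElem?_eq_getElem hi]
  simp only [Option.getD_some]
  rw [List.getElem?_eq_getElem hj]
  rfl

-- ===== VERDICT (by name: the statement is the Claim_ definition above) =====
theorem find_food_spec : Claim_equal_find_food := by
  unfold Claim_equal_find_food
  intro grid _ hPre
  unfold Spec_find_food
  obtain ⟨hne, hrect, i, hi, j, hj, hdollar⟩ := hPre
  obtain ⟨g, gs, rfl⟩ : ∃ g gs, grid = g :: gs := by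
    cases grid with
    | nil => exact absurd rfl hne
    | cons g gs => exact ⟨g, gs, rfl⟩
  simp only [List.headD_cons] at hrect hj
  have hcol0 : (PySem.List.pyGet? (g :: gs) 0).getD [] = g := by
    rw [PySem.List.pyGet?_zero_cons]; rfl
  have hjrow : j < ((g :: gs)[i]'hi).length :=
    lt_of_lt_of_le hj (hrect _ (List.getElem_mem hi))
  have hcell : cellAt (g :: gs) (i : Int) (j : Int) = "$" := by
    rw [cellAt_eq (g :: gs) i j hi hjrow]
    simp only [List.getD_eq_getElem?_getD] at hdollar
    rw [List.getElem?_eq_getElem hi] at hdollar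
    simp only [Option.getD_some] at hdollar
    rw [List.getElem?_eq_getElem hjrow] at hdollar
    simpa using hdollar
  have hmem : ((i : Int), (j : Int)) ∈
      candsA (g :: gs) (PySem.List.len (g :: gs)) (PySem.List.len g) := by
    unfold candsA
    simp only [List.mem_flatMap, List.mem_map, List.mem_filter]
    refine ⟨(i : Int), ?_, (j : Int), ⟨?_, by simp [hcell]⟩, rfl⟩
    · rw [PySem.List.mem_pyRange_one, PySem.List.len_eq]
      constructor
      · omega
      · exact_mod_cast hi
    · rw [PySem.List.mem_pyRange_one, PySem.List.len_eq]
      constructor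
      · omega
      · exact_mod_cast hj
  simp only [find_food, find_food_alt, hcol0]
  cases hcs : candsA (g :: gs) (PySem.List.len (g :: gs)) (PySem.List.len g) with
  | nil => rw [hcs] at hmem; cases hmem
  | cons c cs =>
    rw [PySem.List.pyGet?_zero_cons]
    simp only [Option.getD_some]
    obtain ⟨c1, c2, c3, c4⟩ :=
      candsA_bounds (g :: gs) (PySem.List.len (g :: gs)) (PySem.List.len g) c
        (hcs ▸ List.mem_cons_self)
    have hfuel : freeC (PySem.List.len (g :: gs)) (PySem.List.len g) PySem.Set.empty ≤
        (PySem.List.len (g :: gs)).toNat * (PySem.List.len g).toNat := freeC_le _ _ _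
    have hnn := suff_dfs (g :: gs) (PySem.List.len (g :: gs)) (PySem.List.len g)
      ((PySem.List.len (g :: gs)).toNat * (PySem.List.len g).toNat + 1) c [] PySem.Set.empty
      (by exact List.not_mem_nil) c1 c2 c3 c4 (by omega)
    cases hval : dfsA (g :: gs) (PySem.List.len (g :: gs)) (PySem.List.len g)
        ((PySem.List.len (g :: gs)).toNat * (PySem.List.len g).toNat + 1) c [] PySem.Set.empty with
    | none => exact absurd hval hnn
    | some r =>
      obtain ⟨b, p, v⟩ := r
      -- the value B returns for this run
      have hEv : EvB (g :: gs) (PySem.List.len (g :: gs)) (PySem.List.len g)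
          [(c, 0, none)] (PySem.Set.add PySem.Set.empty c)
          (if b then PySem.Str.join ", " p else "") := by
        refine dfsSim (g :: gs) (PySem.List.len (g :: gs)) (PySem.List.len g)
          ((PySem.List.len (g :: gs)).toNat * (PySem.List.len g).toNat + 1)
          c [] PySem.Set.empty [] none b p v _ hval c1 c2 c3 c4 (by simp [stackPath]) ?_
        cases b with
        | true => simp
        | false => exact ⟨1, by rw [loopB]; rfl⟩
      obtain ⟨n, hn⟩ := hEv
      have hBnn := loopB_suff (g :: gs) (PySem.List.len (g :: gs)) (PySem.List.len g)
        (6 * ((PySem.List.len (g :: gs)).toNat * (PySem.List.len g).toNat) + 8)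
        [(c, 0, none)] (PySem.Set.add PySem.Set.empty c) ?hlt
      case hlt =>
        have h1 := freeC_le (PySem.List.len (g :: gs)) (PySem.List.len g)
          (PySem.Set.add PySem.Set.empty c)
        simp only [List.map_cons, List.map_nil, List.sum_cons, List.sum_nil]
        unfold frameW
        simp only
        omega
      have hBval : loopB (g :: gs) (PySem.List.len (g :: gs)) (PySem.List.len g)
          (6 * ((PySem.List.len (g :: gs)).toNat * (PySem.List.len g).toNat) + 8)
          [(c, 0, none)] (PySem.Set.add PySem.Set.empty c) =
          some (if b then PySem.Str.join ", " p else "") := by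
        rcases Nat.lt_or_ge (6 * ((PySem.List.len (g :: gs)).toNat * (PySem.List.len g).toNat) + 8) n
          with hgt | hle
        case inr => exact loopB_mono_le _ _ _ _ _ hle _ _ _ hn
        case inl =>
          cases hB : loopB (g :: gs) (PySem.List.len (g :: gs)) (PySem.List.len g)
              (6 * ((PySem.List.len (g :: gs)).toNat * (PySem.List.len g).toNat) + 8)
              [(c, 0, none)] (PySem.Set.add PySem.Set.empty c) with
          | none => exact absurd hB hBnn
          | some s' =>
            have := loopB_mono_le (g :: gs) (PySem.List.len (g :: gs)) (PySem.List.len g)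
              _ n (by omega) _ _ _ hB
            rw [this] at hn
            injection hn with h'
            rw [h']
      rw [hBval]
      cases b with
      | true => rfl
      | false =>
        have hp : p = [] := restore_dfs _ _ _ _ _ _ _ _ _ hval
        rw [hp]
        rfl
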